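-- pv_equiv track=rewrite | github.com/TheExplorativeBadger/CS576 | application_driver/helper_modules/dotPlots.py | dot_plot_kmer_points
-- ===== SOURCE A (Python) =====
-- def dot_plot_kmer_points(seq1, seq2, k):
--     """Computes the coordinates of the points in a k-mer dot plot for seq1 compared to seq2.
--
--     A point, (x,y), in such a plot represents positions at which the length k substrings
--     starting at position x in seq1 and position y in seq2 are identical.
--
--     Args:
--         seq1: the first string
--         seq2: the second string
--         k: the length of the substrings to compare
--     Returns:
--         A list of points, where each point is represented as a tuple, (x, y)
--     """
--     responseCoordinatesList = []
--     for characterIndex in range(len(seq1)):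
--         if (characterIndex + k) <= len(seq1):
--             lengthKSeq1 = seq1[characterIndex : characterIndex + k]
--             for secondaryCharacterIndex in range(len(seq2)):
--                 if (secondaryCharacterIndex + k) <= len(seq2):
--                     lengthKSeq2 = seq2[secondaryCharacterIndex : secondaryCharacterIndex + k]
--
--                     if lengthKSeq1 == lengthKSeq2:
--                         responseCoordinatesList.append((characterIndex, secondaryCharacterIndex))
--     return responseCoordinatesList
-- ===== SOURCE B (Python) =====
-- def dot_plot_kmer_points(seq1, seq2, k):
--     pairs = [(seq2[j:j + k], j) for j in range(len(seq2)) if j + k <= len(seq2)]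
--     index = {}
--     for key, j in pairs:
--         index.setdefault(key, []).append(j)
--     result = []
--     for i in range(len(seq1)):
--         if i + k <= len(seq1):
--             for j in index.get(seq1[i:i + k], []):
--                 result.append((i, j))
--     return result
-- ===== Notes on version B (the rewrite author's own statement) =====
-- stated objective: faster
-- what changed: B builds a dictionary mapping each k-mer of seq2 to its (ascending) position list once, then for each seq1 position does a single lookup, replacing A's inner scan of seq2 for every seq1 position.
import Mathlib
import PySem

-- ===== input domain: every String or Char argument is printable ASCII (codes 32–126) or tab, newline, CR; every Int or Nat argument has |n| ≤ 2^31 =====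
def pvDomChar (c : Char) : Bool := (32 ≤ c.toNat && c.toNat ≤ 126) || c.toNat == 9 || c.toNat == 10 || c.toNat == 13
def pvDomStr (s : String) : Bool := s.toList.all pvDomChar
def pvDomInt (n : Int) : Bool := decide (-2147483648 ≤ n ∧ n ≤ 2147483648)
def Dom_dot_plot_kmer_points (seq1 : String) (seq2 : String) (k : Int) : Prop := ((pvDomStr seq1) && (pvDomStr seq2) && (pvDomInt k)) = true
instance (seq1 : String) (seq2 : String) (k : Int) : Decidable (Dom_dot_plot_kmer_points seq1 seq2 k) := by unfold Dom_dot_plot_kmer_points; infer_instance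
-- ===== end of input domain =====

-- B indexes seq2's k-mers in a dict of position lists and does one lookup per seq1
-- position, instead of A's rescan of seq2 for every seq1 position (objective: faster).

-- ===== PORT A =====  (literal port of the nested loops; strings handled as their char lists)
def dot_plot_kmer_points (seq1 : String) (seq2 : String) (k : Int) : List (Int × Int) :=
  let s1 := seq1.toList
  let s2 := seq2.toList
  (PySem.List.pyRange 0 s1.length 1).foldl (fun acc i =>
    if i + k ≤ (s1.length : Int) then
      let lengthKSeq1 := PySem.List.slice s1 (some i) (some (i + k))
      (PySem.List.pyRange 0 s2.length 1).foldl (fun acc j =>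
        if j + k ≤ (s2.length : Int) then
          let lengthKSeq2 := PySem.List.slice s2 (some j) (some (j + k))
          if lengthKSeq1 = lengthKSeq2 then acc ++ [(i, j)] else acc
        else acc) acc
    else acc) []

-- ===== PORT B =====  (literal port of Source B: build the index dict, then lookup per position)
def dot_plot_kmer_points_alt (seq1 : String) (seq2 : String) (k : Int) : List (Int × Int) :=
  let s1 := seq1.toList
  let s2 := seq2.toList
  let pairs := ((PySem.List.pyRange 0 s2.length 1).filter
      (fun j => j + k ≤ (s2.length : Int))).map
      (fun j => (PySem.List.slice s2 (some j) (some (j + k)), j))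
  let index := pairs.foldl (fun d p => d.modify p.1 [] (· ++ [p.2])) PySem.Dict.empty
  (PySem.List.pyRange 0 s1.length 1).foldl (fun acc i =>
    if i + k ≤ (s1.length : Int) then
      (index.getD (PySem.List.slice s1 (some i) (some (i + k))) []).foldl
        (fun acc j => acc ++ [(i, j)]) acc
    else acc) []

-- ===== PRECONDITION & SPEC =====
def Spec_dot_plot_kmer_points (seq1 : String) (seq2 : String) (k : Int) (out : List (Int × Int)) : Prop := out = dot_plot_kmer_points_alt seq1 seq2 k
instance (seq1 : String) (seq2 : String) (k : Int) (out : List (Int × Int)) : Decidable (Spec_dot_plot_kmer_points seq1 seq2 k out) := by unfold Spec_dot_plot_kmer_points; infer_instance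

-- ===== CLAIM (what is proved, stated in full; the proofs are below) =====
def Claim_equal_dot_plot_kmer_points : Prop := ∀ (seq1 : String) (seq2 : String) (k : Int), Dom_dot_plot_kmer_points seq1 seq2 k → Spec_dot_plot_kmer_points seq1 seq2 k (dot_plot_kmer_points seq1 seq2 k)

-- ===== LEMMAS AND PROOFS =====

-- B's index lookup at key K is exactly the list of valid positions j of seq2 whose k-mer is K.
theorem pv_index_getD (s2 : List Char) (k : Int) (K : List Char) :
    ((((PySem.List.pyRange 0 s2.length 1).filter
        (fun j => j + k ≤ (s2.length : Int))).map
        (fun j => (PySem.List.slice s2 (some j) (some (j + k)), j))).foldl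
        (fun d p => d.modify p.1 [] (· ++ [p.2])) PySem.Dict.empty).getD K []
      = (PySem.List.pyRange 0 s2.length 1).filter
          (fun j => decide (j + k ≤ (s2.length : Int) ∧ K = PySem.List.slice s2 (some j) (some (j + k)))) := by
  rw [PySem.Dict.getD_foldl_modify_append]
  simp only [PySem.Dict.getD_empty, List.nil_append, List.filter_map, List.map_map]
  rw [show ((fun p : List Char × Int => p.2) ∘
        (fun j : Int => (PySem.List.slice s2 (some j) (some (j + k)), j))) = id from rfl,
      List.map_id, List.filter_filter]
  apply List.filter_congr
  intro j _
  simp only [Function.comp]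
  have hb : (PySem.List.slice s2 (some j) (some (j + k)) == K)
      = decide (K = PySem.List.slice s2 (some j) (some (j + k))) := by
    by_cases h : K = PySem.List.slice s2 (some j) (some (j + k))
    · subst h; simp
    · simp [h, (Ne.symm h : PySem.List.slice s2 (some j) (some (j + k)) ≠ K)]
  rw [hb, Bool.and_comm, ← Bool.decide_and]

-- A's inner scan over seq2 equals appending B's lookup for the current seq1 k-mer.
theorem pv_inner (s2 : List Char) (k : Int) (K : List Char) (i : Int) (acc : List (Int × Int)) :
    (PySem.List.pyRange 0 s2.length 1).foldl (fun acc j =>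
        if j + k ≤ (s2.length : Int) then
          if K = PySem.List.slice s2 (some j) (some (j + k)) then acc ++ [(i, j)] else acc
        else acc) acc
      = ((PySem.List.pyRange 0 s2.length 1).filter
          (fun j => decide (j + k ≤ (s2.length : Int) ∧ K = PySem.List.slice s2 (some j) (some (j + k))))).foldl
          (fun acc j => acc ++ [(i, j)]) acc := by
  have hcong := PySem.List.foldl_congr_mem (PySem.List.pyRange 0 s2.length 1)
    (fun acc j =>
      if j + k ≤ (s2.length : Int) then
        if K = PySem.List.slice s2 (some j) (some (j + k)) then acc ++ [(i, j)] else acc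
      else acc)
    (fun acc j =>
      if (j + k ≤ (s2.length : Int) ∧ K = PySem.List.slice s2 (some j) (some (j + k)))
      then acc ++ [(i, j)] else acc)
    acc
    (by intro acc j _
        by_cases h1 : j + k ≤ (s2.length : Int) <;>
          by_cases h2 : K = PySem.List.slice s2 (some j) (some (j + k)) <;>
            simp [h1, h2])
  rw [hcong,
      PySem.List.foldl_append_ite
        (fun j => j + k ≤ (s2.length : Int) ∧ K = PySem.List.slice s2 (some j) (some (j + k)))
        (fun j => ((i, j) : Int × Int)),
      PySem.List.foldl_append_singleton_eq_map (fun j => ((i, j) : Int × Int))]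

-- ===== VERDICT (by name: the statement is the Claim_ definition above) =====
theorem dot_plot_kmer_points_spec : Claim_equal_dot_plot_kmer_points := by
  intro seq1 seq2 k _
  unfold Spec_dot_plot_kmer_points dot_plot_kmer_points dot_plot_kmer_points_alt
  apply PySem.List.foldl_congr_mem
  intro acc i _
  by_cases hi : i + k ≤ ((seq1.toList).length : Int)
  · rw [if_pos hi, if_pos hi, pv_index_getD, pv_inner]
  · rw [if_neg hi, if_neg hi]
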